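-- pv_equiv track=rewrite | github.com/YerongLi/dive | hackerrank/+stripe/balanceFix/main.py | adjust_balances
-- ===== SOURCE A (Python) =====
-- def adjust_balances(transactions, platform_account):
--     balances = {}
--
--     # 计算初始账户余额
--     for account, change in transactions:
--         balances[account] = balances.get(account, 0) + change
--
--     # 处理余额不足的账户
--     if platform_account not in balances:
--         balances[platform_account] = 0
--
--     filled_transactions = []
--     for account in list(balances.keys()):
--         if account != platform_account and balances[account] < 0:
--             shortfall = -balances[account]
--             if balances[platform_account] >= shortfall:
--                 balances[platform_account] -= shortfall
--                 balances[account] = 0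
--                 filled_transactions.append((platform_account, -shortfall))
--             else:
--                 filled_transactions.append((platform_account, -balances[platform_account]))
--                 balances[account] += balances[platform_account]
--                 balances[platform_account] = 0
--
--     # 返回余额大于 0 的账户
--     return {acc: bal for acc, bal in balances.items() if bal > 0}
-- ===== SOURCE B (Python) =====
-- def adjust_balances(transactions, platform_account):
--     balances = {}
--     for account, change in transactions:
--         balances[account] = balances.get(account, 0) + change
--     shortfall = sum(-b for a, b in balances.items()
--                     if a != platform_account and b < 0)
--     balances[platform_account] = balances.get(platform_account, 0) - shortfall
--     return {acc: bal for acc, bal in balances.items() if bal > 0}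
-- ===== Notes on version B (the rewrite author's own statement) =====
-- stated objective: simpler
-- what changed: Replaces A's order-dependent greedy per-account fill loop (which mutates the platform balance account by account and tracks an unused filled_transactions list) with a single closed-form adjustment: sum all shortfalls of non-platform accounts and subtract that total from the platform balance once, then keep the positive balances.
import Mathlib
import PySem

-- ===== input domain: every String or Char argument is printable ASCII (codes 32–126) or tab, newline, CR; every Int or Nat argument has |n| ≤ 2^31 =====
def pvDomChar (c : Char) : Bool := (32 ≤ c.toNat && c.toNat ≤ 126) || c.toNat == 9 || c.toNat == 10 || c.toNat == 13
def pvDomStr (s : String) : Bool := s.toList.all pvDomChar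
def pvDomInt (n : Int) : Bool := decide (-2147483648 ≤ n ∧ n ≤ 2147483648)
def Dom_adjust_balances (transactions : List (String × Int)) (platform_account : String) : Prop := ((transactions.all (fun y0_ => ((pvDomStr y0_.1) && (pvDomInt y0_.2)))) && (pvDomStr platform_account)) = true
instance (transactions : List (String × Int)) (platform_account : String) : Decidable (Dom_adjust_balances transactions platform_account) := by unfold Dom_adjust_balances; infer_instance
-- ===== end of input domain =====

-- B replaces A's greedy per-account fill loop by one closed-form platform adjustment; objective: simpler.

-- ===== PORT A =====
-- loop body of A's second `for` loop (state = (balances, filled_transactions))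
def abodyA (platform_account : String)
    (st : PySem.Dict String Int × List (String × Int)) (account : String) :
    PySem.Dict String Int × List (String × Int) :=
  let balances := st.1
  let filled := st.2
  if account ≠ platform_account ∧ balances.getD account 0 < 0 then
    let shortfall := -(balances.getD account 0)
    if shortfall ≤ balances.getD platform_account 0 then
      ((balances.insert platform_account (balances.getD platform_account 0 - shortfall)).insert account 0,
        filled ++ [(platform_account, -shortfall)])
    else
      ((balances.insert account (balances.getD account 0 + balances.getD platform_account 0)).insert platform_account 0,
        filled ++ [(platform_account, -(balances.getD platform_account 0))])
  else
    (balances, filled)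

def adjust_balances (transactions : List (String × Int)) (platform_account : String) : List (String × Int) :=
  let balances := transactions.foldl (fun d p => d.insert p.1 (d.getD p.1 0 + p.2)) PySem.Dict.empty
  let balances := if balances.contains platform_account then balances else balances.insert platform_account 0
  let st := balances.keys.foldl (abodyA platform_account) (balances, [])
  -- final dict comprehension {acc: bal for acc, bal in balances.items() if bal > 0}
  ((st.1.items.filter (fun p => decide (0 < p.2))).foldl
      (fun d (p : String × Int) => d.insert p.1 p.2) PySem.Dict.empty).items

-- ===== PORT B =====
def adjust_balances_alt (transactions : List (String × Int)) (platform_account : String) : List (String × Int) :=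
  let balances := transactions.foldl (fun d p => d.insert p.1 (d.getD p.1 0 + p.2)) PySem.Dict.empty
  let shortfall := ((balances.items.filter
      (fun p => decide (p.1 ≠ platform_account) && decide (p.2 < 0))).map (fun p => -p.2)).sum
  let balances := balances.insert platform_account (balances.getD platform_account 0 - shortfall)
  -- final dict comprehension {acc: bal for acc, bal in balances.items() if bal > 0}
  ((balances.items.filter (fun p => decide (0 < p.2))).foldl
      (fun d (p : String × Int) => d.insert p.1 p.2) PySem.Dict.empty).items

-- ===== PRECONDITION & SPEC =====
def Spec_adjust_balances (transactions : List (String × Int)) (platform_account : String) (out : List (String × Int)) : Prop := out = adjust_balances_alt transactions platform_account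
instance (transactions : List (String × Int)) (platform_account : String) (out : List (String × Int)) : Decidable (Spec_adjust_balances transactions platform_account out) := by unfold Spec_adjust_balances; infer_instance

-- ===== CLAIM (what is proved, stated in full; the proofs are below) =====
def Claim_equal_adjust_balances : Prop := ∀ (transactions : List (String × Int)) (platform_account : String), Dom_adjust_balances transactions platform_account → Spec_adjust_balances transactions platform_account (adjust_balances transactions platform_account)

-- ===== LEMMAS AND PROOFS =====

-- shortfall of the accounts in ks (w.r.t. dict d), as A's loop consumes it
def pvShort (P : String) (d : PySem.Dict String Int) (ks : List String) : Int :=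
  ((ks.filter (fun k => decide (k ≠ P) && decide (d.getD k 0 < 0))).map (fun k => -(d.getD k 0))).sum

lemma pvShort_nonneg (P : String) (d : PySem.Dict String Int) (ks : List String) :
    0 ≤ pvShort P d ks := by
  apply List.sum_nonneg
  intro x hx
  obtain ⟨k, hk, rfl⟩ := List.mem_map.1 hx
  simp [List.mem_filter] at hk
  omega

lemma pvShort_congr (P : String) (d d' : PySem.Dict String Int) (ks : List String)
    (h : ∀ x ∈ ks, x ≠ P → d'.getD x 0 = d.getD x 0) :
    pvShort P d' ks = pvShort P d ks := by
  induction ks with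
  | nil => rfl
  | cons k ks ih =>
    have ih' := ih (fun x hx => h x (List.mem_cons_of_mem _ hx))
    by_cases hk : k = P
    · subst hk
      simp [pvShort, List.filter] at ih' ⊢
      exact ih'
    · have hv : d'.getD k 0 = d.getD k 0 := h k (List.mem_cons_self) hk
      simp [pvShort, List.filter, hv, hk] at ih' ⊢
      by_cases hneg : d.getD k 0 < 0
      · simp [hneg] at ih' ⊢; omega
      · simp [hneg] at ih' ⊢; exact ih'

lemma pvLoop_spec (P : String) : ∀ (ks : List String) (d : PySem.Dict String Int)
    (fl : List (String × Int)), d.keys.Nodup → ks.Nodup → (∀ k ∈ ks, k ∈ d.keys) → P ∈ d.keys →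
    (ks.foldl (abodyA P) (d, fl)).1.keys = d.keys ∧
    (ks.foldl (abodyA P) (d, fl)).1.getD P 0 =
      (if pvShort P d ks = 0 then d.getD P 0 else max (d.getD P 0 - pvShort P d ks) 0) ∧
    ∀ k, k ≠ P →
      (0 < d.getD k 0 → (ks.foldl (abodyA P) (d, fl)).1.getD k 0 = d.getD k 0) ∧
      (d.getD k 0 ≤ 0 → (ks.foldl (abodyA P) (d, fl)).1.getD k 0 ≤ 0) := by
  intro ks
  induction ks with
  | nil =>
    intro d fl hnd _ _ _
    exact ⟨rfl, by simp [pvShort], fun k hk => ⟨fun _ => rfl, fun h => h⟩⟩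
  | cons k ks ih =>
    intro d fl hnd hks hmem hP
    have hkd : k ∈ d.keys := hmem k List.mem_cons_self
    have hknotks : k ∉ ks := (List.nodup_cons.1 hks).1
    have hks' : ks.Nodup := (List.nodup_cons.1 hks).2
    have hSnn := pvShort_nonneg P d ks
    rw [List.foldl_cons]
    by_cases hcond : k ≠ P ∧ d.getD k 0 < 0
    · obtain ⟨hkP, hneg⟩ := hcond
      have hcontP : d.contains P = true := (PySem.Dict.contains_iff_mem_keys _ _).2 hP
      have hcontk : d.contains k = true := (PySem.Dict.contains_iff_mem_keys _ _).2 hkd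
      have hcons : pvShort P d (k :: ks) = -(d.getD k 0) + pvShort P d ks := by
        simp [pvShort, List.filter, hkP, hneg]
      by_cases hge : -(d.getD k 0) ≤ d.getD P 0
      · -- platform covers the shortfall in full
        have hbody : abodyA P (d, fl) k =
            ((d.insert P (d.getD P 0 - -(d.getD k 0))).insert k 0,
              fl ++ [(P, -(-(d.getD k 0)))]) := by
          simp [abodyA, hkP, hneg, hge]
        rw [hbody]
        set d' := (d.insert P (d.getD P 0 - -(d.getD k 0))).insert k 0 with hd'
        have hck : (d.insert P (d.getD P 0 - -(d.getD k 0))).contains k = true := by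
          rw [PySem.Dict.contains_insert]; simp [hcontk]
        have hkeys' : d'.keys = d.keys := by
          rw [hd', PySem.Dict.keys_insert_of_contains _ _ hck,
            PySem.Dict.keys_insert_of_contains _ _ hcontP]
        have hgP : d'.getD P 0 = d.getD P 0 - -(d.getD k 0) := by
          rw [hd', PySem.Dict.getD_insert_of_ne _ _ _ (Ne.symm hkP), PySem.Dict.getD_insert_self]
        have hgk : d'.getD k 0 = 0 := by rw [hd', PySem.Dict.getD_insert_self]
        have hgo : ∀ x, x ≠ k → x ≠ P → d'.getD x 0 = d.getD x 0 := by
          intro x hxk hxP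
          rw [hd', PySem.Dict.getD_insert_of_ne _ _ _ hxk, PySem.Dict.getD_insert_of_ne _ _ _ hxP]
        have hS' : pvShort P d' ks = pvShort P d ks :=
          pvShort_congr P d d' ks (fun x hx hxP => hgo x (fun h => hknotks (h ▸ hx)) hxP)
        obtain ⟨ha, hb, hc⟩ := ih d' (fl ++ [(P, -(-(d.getD k 0)))])
          (by rw [hkeys']; exact hnd) hks'
          (fun x hx => by rw [hkeys']; exact hmem x (List.mem_cons_of_mem _ hx))
          (by rw [hkeys']; exact hP)
        refine ⟨ha.trans hkeys', ?_, ?_⟩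
        · rw [hb, hS', hgP, hcons]
          split_ifs <;> omega
        · intro x hxP
          by_cases hxk : x = k
          · subst hxk
            refine ⟨fun h => absurd h (by omega), fun _ => ?_⟩
            exact (hc x hxP).2 (by rw [hgk])
          · rw [← hgo x hxk hxP]
            exact hc x hxP
      · -- platform exhausted: partial fill
        have hbody : abodyA P (d, fl) k =
            ((d.insert k (d.getD k 0 + d.getD P 0)).insert P 0,
              fl ++ [(P, -(d.getD P 0))]) := by
          simp [abodyA, hkP, hneg, hge]
        rw [hbody]
        set d' := (d.insert k (d.getD k 0 + d.getD P 0)).insert P 0 with hd'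
        have hcP : (d.insert k (d.getD k 0 + d.getD P 0)).contains P = true := by
          rw [PySem.Dict.contains_insert]; simp [hcontP]
        have hkeys' : d'.keys = d.keys := by
          rw [hd', PySem.Dict.keys_insert_of_contains _ _ hcP,
            PySem.Dict.keys_insert_of_contains _ _ hcontk]
        have hgP : d'.getD P 0 = 0 := by rw [hd', PySem.Dict.getD_insert_self]
        have hgk : d'.getD k 0 = d.getD k 0 + d.getD P 0 := by
          rw [hd', PySem.Dict.getD_insert_of_ne _ _ _ hkP, PySem.Dict.getD_insert_self]
        have hgo : ∀ x, x ≠ k → x ≠ P → d'.getD x 0 = d.getD x 0 := by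
          intro x hxk hxP
          rw [hd', PySem.Dict.getD_insert_of_ne _ _ _ hxP, PySem.Dict.getD_insert_of_ne _ _ _ hxk]
        have hS' : pvShort P d' ks = pvShort P d ks :=
          pvShort_congr P d d' ks (fun x hx hxP => hgo x (fun h => hknotks (h ▸ hx)) hxP)
        obtain ⟨ha, hb, hc⟩ := ih d' (fl ++ [(P, -(d.getD P 0))])
          (by rw [hkeys']; exact hnd) hks'
          (fun x hx => by rw [hkeys']; exact hmem x (List.mem_cons_of_mem _ hx))
          (by rw [hkeys']; exact hP)
        refine ⟨ha.trans hkeys', ?_, ?_⟩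
        · rw [hb, hS', hgP, hcons]
          split_ifs <;> omega
        · intro x hxP
          by_cases hxk : x = k
          · subst hxk
            refine ⟨fun h => absurd h (by omega), fun _ => ?_⟩
            exact (hc x hxP).2 (by rw [hgk]; omega)
          · rw [← hgo x hxk hxP]
            exact hc x hxP
    · -- account not mended: state unchanged
      have hbody : abodyA P (d, fl) k = (d, fl) := by
        simp only [abodyA, if_neg hcond]
      have hcons : pvShort P d (k :: ks) = pvShort P d ks := by
        by_cases hk : k = P
        · simp [pvShort, List.filter, hk]
        · have : ¬ d.getD k 0 < 0 := fun h => hcond ⟨hk, h⟩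
          simp [pvShort, List.filter, hk, this]
      rw [hbody, hcons]
      exact ih d fl hnd hks' (fun x hx => hmem x (List.mem_cons_of_mem _ hx)) hP


-- rebuilding a dict from a nodup-key pair list and taking items is the identity
lemma pvRebuild (l : List (String × Int)) (h : (l.map Prod.fst).Nodup) :
    ((l.foldl (fun d (p : String × Int) => d.insert p.1 p.2) PySem.Dict.empty).items) = l := by
  have := PySem.Dict.items_foldl_insert_fresh (l := l) (k := Prod.fst) (v := Prod.snd)
    (d := PySem.Dict.empty) (fun a _ => by simp) h
  simpa using this

lemma pvFilterMapCongr (l : List String) (f g : String → Int)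
    (h : ∀ k ∈ l, (0 < f k ∨ 0 < g k) → f k = g k) :
    (l.map (fun k => (k, f k))).filter (fun p => decide (0 < p.2)) =
    (l.map (fun k => (k, g k))).filter (fun p => decide (0 < p.2)) := by
  induction l with
  | nil => rfl
  | cons k ks ih =>
    have ih' := ih (fun x hx => h x (List.mem_cons_of_mem _ hx))
    have hk := h k (List.mem_cons_self)
    by_cases hf : 0 < f k
    · have hfg := hk (Or.inl hf)
      simp [hfg ▸ hf, hfg, ih']
    · by_cases hg : 0 < g k
      · exact absurd (hk (Or.inr hg)) (by omega)
      · simp [hf, hg, ih']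


-- B's total shortfall, as a function of the aggregated dict
def pvSb (P : String) (d0 : PySem.Dict String Int) : Int :=
  ((d0.items.filter (fun p => decide (p.1 ≠ P) && decide (p.2 < 0))).map (fun p => -p.2)).sum

lemma pvSb_eq_pvShort (P : String) (d0 : PySem.Dict String Int) (hnd0 : d0.keys.Nodup) :
    pvSb P d0 = pvShort P d0 d0.keys := by
  rw [pvSb, PySem.Dict.items_eq_map_keys d0 hnd0 0, List.filter_map, List.map_map]
  rfl

lemma pvFilterKeysNodup (d : PySem.Dict String Int) (hnd : d.keys.Nodup)
    (q : String × Int → Bool) : ((d.items.filter q).map Prod.fst).Nodup := by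
  exact List.Nodup.sublist (List.Sublist.map Prod.fst List.filter_sublist) hnd

lemma pvMain (P : String) (d0 : PySem.Dict String Int) (hnd0 : d0.keys.Nodup) :
    (((if d0.contains P then d0 else d0.insert P 0).keys.foldl (abodyA P)
        ((if d0.contains P then d0 else d0.insert P 0), [])).1.items.filter
        (fun p => decide (0 < p.2))) =
    ((d0.insert P (d0.getD P 0 - pvSb P d0)).items.filter (fun p => decide (0 < p.2))) := by
  by_cases hc : d0.contains P = true
  · have hP : P ∈ d0.keys := (PySem.Dict.contains_iff_mem_keys _ _).1 hc
    rw [if_pos hc]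
    obtain ⟨ha, hb, hc3⟩ := pvLoop_spec P d0.keys d0 [] hnd0 hnd0 (fun k h => h) hP
    have hS : pvShort P d0 d0.keys = pvSb P d0 := (pvSb_eq_pvShort P d0 hnd0).symm
    have hSnn : 0 ≤ pvSb P d0 := hS ▸ pvShort_nonneg P d0 d0.keys
    rw [PySem.Dict.items_eq_map_keys _ (by rw [ha]; exact hnd0) 0, ha,
        PySem.Dict.items_eq_map_keys _ (PySem.Dict.nodup_keys_insert _ _ _ hnd0) 0,
        PySem.Dict.keys_insert_of_contains _ _ hc]
    apply pvFilterMapCongr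
    intro k hk hpos
    by_cases hkP : k = P
    · subst hkP
      rw [hb, hS, PySem.Dict.getD_insert_self] at hpos ⊢
      split_ifs at hpos ⊢ <;> rcases hpos with h | h <;> omega
    · rw [PySem.Dict.getD_insert_of_ne _ _ _ hkP] at hpos ⊢
      obtain ⟨h1, h2⟩ := hc3 k hkP
      by_cases hv : 0 < d0.getD k 0
      · exact h1 hv
      · have h3 := h2 (by omega)
        rcases hpos with h | h <;> omega
  · have hcf : d0.contains P = false := by simpa using hc
    rw [if_neg hc]
    have hkeys1 : (d0.insert P (0 : Int)).keys = d0.keys ++ [P] :=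
      PySem.Dict.keys_insert_of_not_contains _ _ hcf
    have hnd1 : (d0.insert P (0 : Int)).keys.Nodup := PySem.Dict.nodup_keys_insert _ _ _ hnd0
    have hP1 : P ∈ (d0.insert P (0 : Int)).keys := by rw [hkeys1]; simp
    rw [hkeys1]
    obtain ⟨ha, hb, hc3⟩ := pvLoop_spec P (d0.insert P (0 : Int)).keys (d0.insert P (0 : Int)) []
      hnd1 hnd1 (fun k h => h) hP1
    rw [hkeys1] at ha hb hc3
    have hgo : ∀ x, x ≠ P → (d0.insert P (0 : Int)).getD x 0 = d0.getD x 0 := fun x hx =>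
      PySem.Dict.getD_insert_of_ne _ _ _ hx
    have hgP1 : (d0.insert P (0 : Int)).getD P 0 = (0 : Int) := PySem.Dict.getD_insert_self _ _ _ _
    have hgP0 : d0.getD P 0 = (0 : Int) := PySem.Dict.getD_of_not_contains _ _ hcf
    have hS : pvShort P (d0.insert P (0 : Int)) (d0.keys ++ [P]) = pvSb P d0 := by
      have happ : pvShort P (d0.insert P (0 : Int)) (d0.keys ++ [P]) =
          pvShort P (d0.insert P (0 : Int)) d0.keys := by
        simp [pvShort, List.filter_append, List.filter]
      rw [happ, pvShort_congr P d0 (d0.insert P (0 : Int)) d0.keys (fun x _ hx => hgo x hx),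
        ← pvSb_eq_pvShort P d0 hnd0]
    have hSnn : 0 ≤ pvSb P d0 := hS ▸ pvShort_nonneg P (d0.insert P (0 : Int)) (d0.keys ++ [P])
    rw [PySem.Dict.items_eq_map_keys _ (by rw [ha, ← hkeys1]; exact hnd1) 0, ha,
        PySem.Dict.items_eq_map_keys _ (PySem.Dict.nodup_keys_insert _ _ _ hnd0) 0,
        PySem.Dict.keys_insert_of_not_contains _ _ hcf]
    apply pvFilterMapCongr
    intro k hk hpos
    by_cases hkP : k = P
    · subst hkP
      rw [hb, hS, hgP1, PySem.Dict.getD_insert_self, hgP0] at hpos ⊢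
      split_ifs at hpos ⊢ <;> rcases hpos with h | h <;> omega
    · rw [PySem.Dict.getD_insert_of_ne _ _ _ hkP] at hpos ⊢
      obtain ⟨h1, h2⟩ := hc3 k hkP
      rw [hgo k hkP] at h1 h2
      by_cases hv : 0 < d0.getD k 0
      · exact h1 hv
      · have h3 := h2 (by omega)
        rcases hpos with h | h <;> omega

lemma pvLoopNodup (P : String) (d1 : PySem.Dict String Int) (hnd1 : d1.keys.Nodup)
    (hP : P ∈ d1.keys) : ((d1.keys.foldl (abodyA P) (d1, [])).1).keys.Nodup := by
  rw [(pvLoop_spec P d1.keys d1 [] hnd1 hnd1 (fun k h => h) hP).1]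
  exact hnd1

-- ===== VERDICT (by name: the statement is the Claim_ definition above) =====
theorem adjust_balances_spec : Claim_equal_adjust_balances := by
  intro transactions platform_account _
  unfold Spec_adjust_balances
  simp only [adjust_balances, adjust_balances_alt]
  set d0 := transactions.foldl (fun d p => d.insert p.1 (d.getD p.1 0 + p.2))
    PySem.Dict.empty with hd0
  have hnd0 : d0.keys.Nodup := by
    rw [hd0]
    exact PySem.Dict.nodup_keys_foldl_insert_key _ _ _ _ PySem.Dict.nodup_keys_empty
  have hnd1 : (if d0.contains platform_account then d0
      else d0.insert platform_account 0).keys.Nodup := by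
    by_cases hc : d0.contains platform_account = true
    · rw [if_pos hc]; exact hnd0
    · rw [if_neg hc]; exact PySem.Dict.nodup_keys_insert _ _ _ hnd0
  have hP1 : platform_account ∈ (if d0.contains platform_account then d0
      else d0.insert platform_account 0).keys := by
    by_cases hc : d0.contains platform_account = true
    · rw [if_pos hc]; exact (PySem.Dict.contains_iff_mem_keys _ _).1 hc
    · rw [if_neg hc,
        PySem.Dict.keys_insert_of_not_contains _ _ (by simpa using hc)]
      simp
  rw [pvRebuild _ (pvFilterKeysNodup _ (pvLoopNodup _ _ hnd1 hP1) _),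
      pvRebuild _ (pvFilterKeysNodup _ (PySem.Dict.nodup_keys_insert _ _ _ hnd0) _)]
  exact pvMain platform_account d0 hnd0
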